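/-
  jsmn, pure: THE RESULT OF jsmn_parse IS AN `int`. The model's results are mathematical integers; `jsmn_main` tests the sign of the machine's
  32-bit `eax`, so its proof needs `-2^31 ≤ r < 2^31` for the `r` the model answers. The model only ever returns an error code or `count`,
  which it keeps wrapped (`i32`); this file reads that off `SafeFacts.body` (one trip through the loop keeps `count` in range; a `return`
  inside the loop returns an error code) by induction on the fuel. No machine state here.
-/
import Json.Jsmn.Inv
import Json.Jsmn.SafeSub

namespace Jsmn

/-- `finish` returns `count` or JSMN_ERROR_PART. -/
theorem finish_range (s : St) (hc : -2147483648 ≤ s.count ∧ s.count < 2147483648) : -2147483648 ≤ finish s ∧ finish s < 2147483648 := by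
  unfold finish
  split
  · exact hc
  · dsimp only
    split
    · exact hc
    · split
      · decide
      · exact hc

/-- The main loop returns an `int`. -/
theorem loop_range {cfg : Config} (sf : SafeFacts cfg) {js : List UInt8} {n : Nat} (fuel : Nat) (s : St) (h : Inv cfg s.p s.toks n)
    (hc : -2147483648 ≤ s.count ∧ s.count < 2147483648) (r : Int) (s' : St) (hl : loop cfg js n fuel s = some (r, s')) :
    -2147483648 ≤ r ∧ r < 2147483648 := by
  induction fuel generalizing s with
  | zero => simp [loop] at hl
  | succ f ih =>
    rw [loop] at hl
    split at hl
    · split at hl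
      · cases hl
      · rename_i r1 s1 hb
        cases hl
        rcases ((sf.body js (f + 1) n s _ h hc).2 _ _ hb).2.1 with e | e | e <;> subst e <;> decide
      · rename_i s1 hb
        obtain ⟨a, b, _⟩ := (sf.body js (f + 1) n s _ h hc).1 _ hb
        exact ih { s1 with p := { s1.p with pos := u32 (s1.p.pos + 1) } } (a.setPos _ (u32_lt _)) b hl
    · simp only [Option.some.injEq, Prod.mk.injEq] at hl
      rw [← hl.1]; exact finish_range s hc

/-- **jsmn_parse returns an `int`.** -/
theorem parseFuel_range {cfg : Config} (sf : SafeFacts cfg) {fuel : Nat} {js : List UInt8} {p : Parser} {toks : Option Tokens} {n : Nat}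
    {r : Int} {p' : Parser} {toks' : Option Tokens} (h : Inv cfg p toks n) (hp : parseFuel cfg fuel js p toks n = some (r, p', toks')) :
    -2147483648 ≤ r ∧ r < 2147483648 := by
  unfold parseFuel at hp
  cases hl : loop cfg js n fuel ⟨p, toks, i32 p.toknext⟩ with
  | none => simp [hl] at hp
  | some x =>
    obtain ⟨r1, s1⟩ := x
    simp only [hl, Option.map_some, Option.some.injEq, Prod.mk.injEq] at hp
    obtain ⟨rfl, rfl, rfl⟩ := hp
    exact loop_range sf fuel ⟨p, toks, i32 p.toknext⟩ h (i32_range _) _ _ hl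

end Jsmn
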